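-- pv_equiv track=rewrite | github.com/wjdengus98/Algorithms | 프로그래머스/1/133499. 옹알이 （2）/옹알이 （2）.py | solution
-- ===== SOURCE A (Python) =====
-- def solution(babbling):
--     can_speak = ["aya", "ye", "woo", "ma"]
--     answer = 0
--     for babble in babbling:
--         word = babble
--         prev = "" # 이전 발음 기록
--         flag = True # 단어 성공 여부
--
--         while word and flag:
--             found = False
--
--             for sound in can_speak:
--                 if word.startswith(sound) and sound != prev: # sound가 Babbling 안에 있고,연속해서 같은 발음을 하는 것을 막기.
--                     word = word[len(sound):] # 해당 단어 제거
--                     prev = sound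
--                     found = True
--                     break
--             if not found: #  sound가 word에 포함안되어 있으면
--                 flag = False #단어 발음 불가
--
--         if flag and not word: #단어 발음 가능, word가 다 제거되었으면
--             answer += 1 #카운트
--
--     return answer
-- ===== SOURCE B (Python) =====
-- def solution(babbling):
--     sounds = ("aya", "ye", "woo", "ma")
--
--     def ok(w):
--         i, prev, n = 0, None, len(w)
--         while i < n:
--             for s in sounds:
--                 if s != prev and w.startswith(s, i):
--                     i += len(s)
--                     prev = s
--                     break
--             else:
--                 return False
--         return True
--
--     return sum(1 for w in babbling if ok(w))
-- ===== Notes on version B (the rewrite author's own statement) =====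
-- stated objective: alternative
-- what changed: Replace A's per-step string slicing (word = word[len(sound):]) by a greedy parse that advances an index pointer with startswith(s, i) and never copies the word, and count matches with sum over a predicate instead of a mutable accumulator loop.
import Mathlib
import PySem

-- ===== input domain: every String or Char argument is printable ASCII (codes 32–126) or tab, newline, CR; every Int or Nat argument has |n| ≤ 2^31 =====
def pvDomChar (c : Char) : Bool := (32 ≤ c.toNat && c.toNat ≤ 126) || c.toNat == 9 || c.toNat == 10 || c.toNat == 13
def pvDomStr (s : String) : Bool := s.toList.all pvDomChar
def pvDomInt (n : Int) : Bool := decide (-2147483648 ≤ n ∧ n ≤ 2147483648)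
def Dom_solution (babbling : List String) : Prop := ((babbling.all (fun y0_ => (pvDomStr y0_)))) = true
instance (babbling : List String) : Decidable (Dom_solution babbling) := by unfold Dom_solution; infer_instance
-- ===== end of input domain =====

-- B parses each word with an index pointer (startswith at an offset) instead of A's repeated slicing; equal return value on all inputs.

-- ===== PORT A =====
-- the allowed syllables (A's can_speak list)
def canSpeakA : List String := ["aya", "ye", "woo", "ma"]

-- A's inner `for sound in can_speak: if word.startswith(sound) and sound != prev: … break`
-- returns the remaining word (after slicing off the sound) and the new prev, or none (found = False)
def tryA : List String → List Char → String → Option (List Char × String)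
  | [], _, _ => none
  | s :: rest, word, prev =>
    if s.toList.isPrefixOf word && s ≠ prev then some (word.drop s.toList.length, s)
    else tryA rest word prev

theorem tryA_shrink (ss : List String) (word : List Char) (prev : String)
    (hne : ∀ s ∈ ss, s.toList ≠ []) (w' : List Char) (s : String)
    (h : tryA ss word prev = some (w', s)) : w'.length < word.length := by
  induction ss with
  | nil => simp [tryA] at h
  | cons t rest ih =>
    simp only [tryA] at h
    split at h
    · rename_i hc
      simp only [Bool.and_eq_true, decide_eq_true_eq] at hc
      rw [Option.some.injEq, Prod.mk.injEq] at h
      have hlen : t.toList.length ≤ word.length := (List.isPrefixOf_iff_prefix.mp hc.1).length_le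
      have h0 : 0 < t.toList.length := List.length_pos_iff.mpr (hne t (by simp))
      rw [← h.1]
      simp only [List.length_drop]
      omega
    · exact ih (fun x hx => hne x (by simp [hx])) h

-- A's `while word and flag` loop; returns True iff the loop ends with flag True and word empty
def loopA (word : List Char) (prev : String) : Bool :=
  if word = [] then true
  else
    match h : tryA canSpeakA word prev with
    | some (w', s) => loopA w' s
    | none => false
termination_by word.length
decreasing_by
  exact tryA_shrink canSpeakA word prev (by decide) _ _ h

def solution (babbling : List String) : Int :=
  babbling.foldl (fun answer babble => if loopA babble.toList "" then answer + 1 else answer) 0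

-- ===== PORT B =====
def soundsB : List String := ["aya", "ye", "woo", "ma"]

-- Python w.startswith(s, i): char-by-char comparison at offset i, no slicing
def matchesAt (w : List Char) (i : Nat) : List Char → Bool
  | [] => true
  | c :: rest =>
    if h : i < w.length then w[i] = c && matchesAt w (i + 1) rest
    else false

-- B's inner for-else over the sounds: first s with s ≠ prev matching at i
def pickB : List String → List Char → Nat → Option String → Option String
  | [], _, _, _ => none
  | s :: rest, w, i, prev =>
    if some s ≠ prev && matchesAt w i s.toList then some s
    else pickB rest w i prev

theorem pickB_mem (ss : List String) (w : List Char) (i : Nat) (prev : Option String)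
    (s : String) (h : pickB ss w i prev = some s) : s ∈ ss := by
  induction ss with
  | nil => simp [pickB] at h
  | cons t rest ih =>
    simp only [pickB] at h
    split at h
    · cases h; simp
    · exact List.mem_cons_of_mem _ (ih h)

-- B's `while i < n` loop with the index pointer
def goB (w : List Char) (i : Nat) (prev : Option String) : Bool :=
  if i < w.length then
    match h : pickB soundsB w i prev with
    | some s => goB w (i + s.toList.length) (some s)
    | none => false
  else true
termination_by w.length - i
decreasing_by
  have hmem := pickB_mem soundsB w i prev s h
  have h0 : 0 < s.toList.length := by
    fin_cases hmem <;> decide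
  omega

def solution_alt (babbling : List String) : Int :=
  (babbling.countP (fun w => goB w.toList 0 none) : Int)

-- ===== PRECONDITION & SPEC =====
def Spec_solution (babbling : List String) (out : Int) : Prop := out = solution_alt babbling
instance (babbling : List String) (out : Int) : Decidable (Spec_solution babbling out) := by unfold Spec_solution; infer_instance

-- ===== CLAIM (what is proved, stated in full; the proofs are below) =====
def Claim_equal_solution : Prop := ∀ (babbling : List String), Dom_solution babbling → Spec_solution babbling (solution babbling)

-- ===== LEMMAS AND PROOFS =====

-- prev conversion: A uses "" for "no previous sound", B uses none
def prevStr : Option String → String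
  | none => ""
  | some s => s

theorem matchesAt_eq_isPrefixOf (s : List Char) (w : List Char) (i : Nat) :
    matchesAt w i s = s.isPrefixOf (w.drop i) := by
  induction s generalizing i with
  | nil => simp [matchesAt]
  | cons c rest ih =>
    simp only [matchesAt]
    split
    · rename_i h
      rw [ih]
      have hdrop : w.drop i = w[i] :: w.drop (i + 1) := List.drop_eq_getElem_cons h
      rw [hdrop]
      simp only [List.isPrefixOf, ih]
      by_cases hce : w[i] = c
      · simp [hce]
      · simp [hce, Ne.symm hce]
    · rename_i h
      have : w.drop i = [] := List.drop_eq_nil_of_le (by omega)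
      simp [this]

theorem pickB_eq_tryA (ss : List String) (w : List Char) (i : Nat) (prev : Option String)
    (hne : ∀ s ∈ ss, s ≠ "") :
    tryA ss (w.drop i) (prevStr prev) =
      (pickB ss w i prev).map (fun s => (w.drop (i + s.toList.length), s)) := by
  induction ss with
  | nil => simp [tryA, pickB]
  | cons t rest ih =>
    have hcond : (t.toList.isPrefixOf (w.drop i) && t ≠ prevStr prev)
        = (some t ≠ prev && matchesAt w i t.toList) := by
      rw [matchesAt_eq_isPrefixOf]
      have hprev : (decide (t ≠ prevStr prev)) = (decide (some t ≠ prev)) := by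
        cases prev with
        | none =>
          simp [prevStr, hne t (by simp)]
        | some p => simp [prevStr]
      rw [Bool.and_comm]
      simp [hprev]
    simp only [tryA, pickB, hcond]
    split
    · simp [List.drop_drop]
    · exact ih (fun x hx => hne x (by simp [hx]))

theorem goB_eq_loopA (w : List Char) (i : Nat) (prev : Option String) :
    goB w i prev = loopA (w.drop i) (prevStr prev) := by
  generalize hk : w.length - i = k
  induction k using Nat.strong_induction_on generalizing i prev with
  | _ k ih =>
  rw [goB, loopA]
  by_cases hlt : i < w.length
  · have hdne : ¬ (w.drop i = []) := by
      simp [List.drop_eq_nil_iff]; omega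
    simp only [if_pos hlt, if_neg hdne]
    have hcorr := pickB_eq_tryA soundsB w i prev (by decide)
    have hss : soundsB = canSpeakA := rfl
    rw [hss] at hcorr ⊢
    cases hpick : pickB canSpeakA w i prev with
    | none =>
      rw [hpick] at hcorr
      simp only [Option.map_none] at hcorr
      rw [hcorr]
    | some s =>
      rw [hpick] at hcorr
      simp only [Option.map_some] at hcorr
      rw [hcorr]
      have h0 : 0 < s.toList.length := by
        have := pickB_mem canSpeakA w i prev s hpick
        fin_cases this <;> decide
      exact ih (w.length - (i + s.toList.length)) (by omega) (i + s.toList.length) (some s) rfl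
  · have : w.drop i = [] := List.drop_eq_nil_of_le (by omega)
    simp [hlt, this]

theorem ok_eq (b : String) : loopA b.toList "" = goB b.toList 0 none := by
  rw [goB_eq_loopA]; rfl

theorem count_foldl (xs : List String) (acc : Int) :
    xs.foldl (fun answer babble => if loopA babble.toList "" then answer + 1 else answer) acc
      = acc + (xs.countP (fun w => goB w.toList 0 none) : Int) := by
  induction xs generalizing acc with
  | nil => simp
  | cons x rest ih =>
    rw [List.foldl_cons, List.countP_cons]
    by_cases h : loopA x.toList "" = true
    · have hx : goB x.toList 0 none = true := by rw [← ok_eq]; exact h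
      rw [if_pos h, ih]
      simp only [hx, if_pos]
      push_cast
      ring
    · have hx : goB x.toList 0 none = false := by rw [← ok_eq]; simpa using h
      rw [if_neg h, ih]
      simp [hx]

-- ===== VERDICT (by name: the statement is the Claim_ definition above) =====
theorem solution_spec : Claim_equal_solution := by
  intro babbling _
  show solution babbling = solution_alt babbling
  unfold solution solution_alt
  rw [count_foldl]
  simp
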